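-- pv_equiv track=rewrite | github.com/MihailZimin/route-planning | tsp_algorithms/abstract_solver.py | _unravel_multiple_salesmen_routes
-- ===== SOURCE A (Python) =====
-- import itertools
--
-- def _unravel_multiple_salesmen_routes(
--
--         mixed_route: list[int],
--         points_count: int,
--         start_point: int
--     ) -> list[list[int]]:
--     """
--     Divide raw route to multiple routes for each salesman.
--
--     Args:
--         mixed_route: route with mixed salesmen pathes
--         points_count: count of control points
--         start_point: start point
--
--     Returns:
--         list of lists of routes for each salesman
--
--     """
--     single_route = []
--     result_routes = []
--     for current_point, next_point in itertools.pairwise(mixed_route):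
--         point_to_add = current_point
--         if point_to_add >= points_count:
--             point_to_add = start_point
--         single_route.append(point_to_add)
--         if next_point >= points_count or next_point == start_point:
--             single_route.append(single_route[0])
--             result_routes.append(single_route.copy())
--             single_route = []
--
--     return result_routes
-- ===== SOURCE B (Python) =====
-- def _unravel_multiple_salesmen_routes(mixed_route, points_count, start_point):
--     # Staged index-based approach: first collect the cut indices (positions 1..n-1
--     # that start a new salesman's route), then build each route from the slice
--     # between consecutive cuts, normalizing depot markers and closing the loop.
--     n = len(mixed_route)
--     cuts = [i for i in range(1, n)
--             if mixed_route[i] >= points_count or mixed_route[i] == start_point]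
--     routes = []
--     for a, b in zip([0] + cuts, cuts):
--         seg = [start_point if x >= points_count else x for x in mixed_route[a:b]]
--         routes.append(seg + [seg[0]])
--     return routes
-- ===== Notes on version B (the rewrite author's own statement) =====
-- stated objective: alternative
-- what changed: Instead of A's single pairwise fold that grows the current route and flushes it on a lookahead boundary, B works in stages over indices: it first collects the list of cut positions (indices 1..n-1 whose element is >= points_count or equals start_point), then zips adjacent cuts and materialises each route as a normalized slice mixed_route[prev:cut] closed with its own first element.
import Mathlib
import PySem

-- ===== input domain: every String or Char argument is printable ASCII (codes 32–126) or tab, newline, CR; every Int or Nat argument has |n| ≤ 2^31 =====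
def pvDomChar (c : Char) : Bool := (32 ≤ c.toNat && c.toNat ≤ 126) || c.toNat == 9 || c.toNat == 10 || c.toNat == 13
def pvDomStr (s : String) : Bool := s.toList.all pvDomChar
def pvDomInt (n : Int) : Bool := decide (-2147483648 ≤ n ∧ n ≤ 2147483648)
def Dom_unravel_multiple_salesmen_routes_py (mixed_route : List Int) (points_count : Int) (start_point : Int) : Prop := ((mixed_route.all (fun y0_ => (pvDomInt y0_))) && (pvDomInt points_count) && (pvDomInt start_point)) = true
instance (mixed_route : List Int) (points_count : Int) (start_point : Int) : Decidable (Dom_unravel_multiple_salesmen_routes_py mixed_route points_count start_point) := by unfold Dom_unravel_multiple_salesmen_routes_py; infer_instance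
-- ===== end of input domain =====

-- B first collects the cut indices in one scan, then builds each route from the slice
-- between consecutive cuts: a staged index/slice decomposition (objective: alternative).

-- ===== PORT A =====
-- literal port: itertools.pairwise = zip xs xs.tail; state = (single_route, result_routes);
-- single_route[0] is read just after an append, so the list is never empty and headD 0 is exact
def unravel_multiple_salesmen_routes_py (mixed_route : List Int) (points_count : Int) (start_point : Int) : List (List Int) :=
  ((mixed_route.zip mixed_route.tail).foldl
    (fun (st : List Int × List (List Int)) pq =>
      let point_to_add := if pq.1 ≥ points_count then start_point else pq.1
      let single := st.1 ++ [point_to_add]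
      if pq.2 ≥ points_count ∨ pq.2 = start_point then
        ([], st.2 ++ [single ++ [single.headD 0]])
      else (single, st.2))
    ([], [])).2

-- ===== PORT B =====
-- port of Source B: range(1, n) = List.range' 1 (n-1); mixed_route[i] for i in that range is
-- getD i 0 (exact: every filtered index is in range); mixed_route[a:b] with 0 ≤ a ≤ b ≤ n
-- is (drop a).take (b-a); seg[0] is seg.headD 0, exact since each slice is nonempty (a < b).
def unravel_multiple_salesmen_routes_py_alt (mixed_route : List Int) (points_count : Int) (start_point : Int) : List (List Int) :=
  let n := mixed_route.length
  let cuts := (List.range' 1 (n - 1)).filter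
      (fun i => decide (mixed_route.getD i 0 ≥ points_count ∨ mixed_route.getD i 0 = start_point))
  ((0 :: cuts).zip cuts).foldl
    (fun (routes : List (List Int)) ab =>
      let seg := ((mixed_route.drop ab.1).take (ab.2 - ab.1)).map
        (fun x => if x ≥ points_count then start_point else x)
      routes ++ [seg ++ [seg.headD 0]]) []

-- ===== PRECONDITION & SPEC =====
def Spec_unravel_multiple_salesmen_routes_py (mixed_route : List Int) (points_count : Int) (start_point : Int) (out : List (List Int)) : Prop := out = unravel_multiple_salesmen_routes_py_alt mixed_route points_count start_point
instance (mixed_route : List Int) (points_count : Int) (start_point : Int) (out : List (List Int)) : Decidable (Spec_unravel_multiple_salesmen_routes_py mixed_route points_count start_point out) := by unfold Spec_unravel_multiple_salesmen_routes_py; infer_instance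

-- ===== CLAIM (what is proved, stated in full; the proofs are below) =====
def Claim_equal_unravel_multiple_salesmen_routes_py : Prop := ∀ (mixed_route : List Int) (points_count : Int) (start_point : Int), Dom_unravel_multiple_salesmen_routes_py mixed_route points_count start_point → Spec_unravel_multiple_salesmen_routes_py mixed_route points_count start_point (unravel_multiple_salesmen_routes_py mixed_route points_count start_point)

-- ===== LEMMAS AND PROOFS =====

-- common recursive characterisation: acc is the normalized current segment,
-- the remaining input is consumed element by element
def pvChunks (pc sp : Int) : List Int → List Int → List (List Int)
  | _, [] => []
  | acc, z :: t =>
    if z ≥ pc ∨ z = sp then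
      (acc ++ [acc.headD 0]) :: pvChunks pc sp [if z ≥ pc then sp else z] t
    else pvChunks pc sp (acc ++ [if z ≥ pc then sp else z]) t

-- A's pairwise fold equals pvChunks
theorem pvA_eq_chunks (pc sp : Int) :
    ∀ (rest : List Int) (y : Int) (single : List Int) (res : List (List Int)),
    ((((y :: rest).zip rest).foldl
      (fun (st : List Int × List (List Int)) pq =>
        let point_to_add := if pq.1 ≥ pc then sp else pq.1
        let single := st.1 ++ [point_to_add]
        if pq.2 ≥ pc ∨ pq.2 = sp then
          ([], st.2 ++ [single ++ [single.headD 0]])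
        else (single, st.2))
      (single, res)).2 : List (List Int)) =
    res ++ pvChunks pc sp (single ++ [if y ≥ pc then sp else y]) rest := by
  intro rest
  induction rest with
  | nil => intro y single res; simp [List.zip, pvChunks]
  | cons z t ih =>
    intro y single res
    by_cases hb : z ≥ pc ∨ z = sp
    · simp only [List.zip, List.zipWith, List.foldl, if_pos hb, pvChunks]
      have h1 := ih z [] (res ++ [single ++ [if y ≥ pc then sp else y] ++
        [(single ++ [if y ≥ pc then sp else y]).headD 0]])
      simp only [List.zip] at h1
      simpa [List.append_assoc] using h1
    · simp only [List.zip, List.zipWith, List.foldl, if_neg hb, pvChunks]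
      have h1 := ih z (single ++ [if y ≥ pc then sp else y]) res
      simp only [List.zip] at h1
      simpa using h1

-- B's cuts/slices fold equals pvChunks (generalized over the current position i,
-- the current segment start a, and the routes accumulated so far)
theorem pvB_eq_chunks (pc sp : Int) (L : List Int) :
    ∀ (rem : List Int) (i a : ℕ) (routes : List (List Int)),
    L.drop i = rem → a ≤ i →
    ((a :: (List.range' i (L.length - i)).filter
        (fun j => decide (L.getD j 0 ≥ pc ∨ L.getD j 0 = sp))).zip
      ((List.range' i (L.length - i)).filter
        (fun j => decide (L.getD j 0 ≥ pc ∨ L.getD j 0 = sp)))).foldl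
      (fun (routes : List (List Int)) ab =>
        let seg := ((L.drop ab.1).take (ab.2 - ab.1)).map (fun x => if x ≥ pc then sp else x)
        routes ++ [seg ++ [seg.headD 0]]) routes =
    routes ++ pvChunks pc sp (((L.drop a).take (i - a)).map (fun x => if x ≥ pc then sp else x)) rem := by
  intro rem
  induction rem with
  | nil =>
    intro i a routes hdrop _
    have h0 : L.length - i = 0 := by
      have := congrArg List.length hdrop
      simpa using this
    simp [h0, List.zip, pvChunks]
  | cons z t ih =>
    intro i a routes hdrop ha
    have hi : i < L.length := by
      have := congrArg List.length hdrop
      simp at this; omega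
    have hcons : z :: t = L[i] :: L.drop (i + 1) := by
      rw [← hdrop]; exact List.drop_eq_getElem_cons hi
    have hz : L[i] = z := by injection hcons with h1 h2; exact h1.symm
    have ht : L.drop (i + 1) = t := by injection hcons with h1 h2; exact h2.symm
    have hopt : L[i]? = some z := by rw [List.getElem?_eq_getElem hi, hz]
    have hlen : L.length - i = (L.length - (i + 1)) + 1 := by omega
    rw [hlen, List.range'_succ]
    by_cases hb : z ≥ pc ∨ z = sp
    · -- i is a cut: close the current segment and start a new one at i
      rw [List.filter_cons_of_pos (by simp [List.getD, hopt]; exact hb), List.zip_cons_cons, List.foldl_cons]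
      have hih := ih (i + 1) i (routes ++
        [((L.drop a).take (i - a)).map (fun x => if x ≥ pc then sp else x) ++
          [(((L.drop a).take (i - a)).map (fun x => if x ≥ pc then sp else x)).headD 0]])
        ht (by omega)
      rw [hih]
      have hseg1 : ((L.drop i).take (i + 1 - i)).map (fun x => if x ≥ pc then sp else x)
          = [if z ≥ pc then sp else z] := by
        have h1 : i + 1 - i = 1 := by omega
        rw [h1, hdrop]; simp
      rw [hseg1]
      simp [pvChunks, hb, List.append_assoc]
    · rw [List.filter_cons_of_neg (by simp only [List.getD, hopt, Option.getD_some, decide_eq_true_eq]; exact hb)]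
      have hih := ih (i + 1) a routes ht (by omega)
      rw [hih]
      have hext : ((L.drop a).take (i + 1 - a)).map (fun x => if x ≥ pc then sp else x)
          = ((L.drop a).take (i - a)).map (fun x => if x ≥ pc then sp else x) ++
            [if z ≥ pc then sp else z] := by
        have h1 : i + 1 - a = (i - a) + 1 := by omega
        have h2 : (L.drop a)[i - a]? = some z := by
          rw [List.getElem?_drop]
          have h3 : a + (i - a) = i := by omega
          rw [h3, List.getElem?_eq_getElem hi, hz]
        rw [h1, List.take_add_one, h2]
        simp
      rw [hext]
      simp [pvChunks, hb]

-- ===== VERDICT (by name: the statement is the Claim_ definition above) =====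
theorem unravel_multiple_salesmen_routes_py_spec : Claim_equal_unravel_multiple_salesmen_routes_py := by
  intro mixed_route points_count start_point _
  unfold Spec_unravel_multiple_salesmen_routes_py
  unfold unravel_multiple_salesmen_routes_py unravel_multiple_salesmen_routes_py_alt
  cases mixed_route with
  | nil => simp [List.zip]
  | cons h tl =>
    simp only [List.tail]
    rw [pvA_eq_chunks points_count start_point tl h [] []]
    rw [pvB_eq_chunks points_count start_point (h :: tl) tl 1 0 [] (by simp) (by omega)]
    simp
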